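-- pv_equiv track=rewrite | github.com/monika0603/lovely-python | strings/longestDigitsPrefix.py | digitPrefix
-- ===== SOURCE A (Python) =====
-- def digitPrefix(input):
--
--     output = ''
--
--     for i in input:
--         if i.isdigit():
--             output += i
--         else:
--             output += '-'
--
--     output = output.split('-')
--
--     length = []
--     for i, n in enumerate(output):
--         length.append(len(n))
--
--     max_length = max(length)
--
--     for i in output:
--         if max_length == len(i):
--             return "".join(i)
-- ===== SOURCE B (Python) =====
-- def digitPrefix(input):
--     current = ''
--     best = ''
--     for ch in input:
--         if ch.isdigit():
--             current += ch
--         else: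
--             if len(current) > len(best):
--                 best = current
--             current = ''
--     if len(current) > len(best):
--         best = current
--     return best
-- ===== Notes on version B (the rewrite author's own statement) =====
-- stated objective: simpler
-- what changed: Replaces A's mask/split/length-list/max/rescan pipeline (several passes and intermediate lists) with a single left-to-right pass keeping the current digit run and the best (first longest) run seen so far.
import Mathlib
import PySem

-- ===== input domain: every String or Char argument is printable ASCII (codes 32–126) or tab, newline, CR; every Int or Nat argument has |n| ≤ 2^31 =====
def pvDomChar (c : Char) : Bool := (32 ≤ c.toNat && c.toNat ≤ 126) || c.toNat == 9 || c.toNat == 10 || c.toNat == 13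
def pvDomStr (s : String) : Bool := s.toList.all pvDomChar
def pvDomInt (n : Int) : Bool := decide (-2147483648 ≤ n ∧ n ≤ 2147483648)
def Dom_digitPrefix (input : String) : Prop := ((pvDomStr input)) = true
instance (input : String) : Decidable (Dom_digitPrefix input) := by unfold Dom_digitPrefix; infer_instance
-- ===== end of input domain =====

-- B replaces A's mask/split('-')/length-list/max/rescan pipeline with one left-to-right pass
-- keeping the current digit run and the first longest run seen (objective: simpler).

-- ===== PORT A =====
def digitPrefix (input : String) : String :=
  -- output = ''; for i in input: output += i if i.isdigit() else '-'
  let output := input.toList.foldl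
    (fun acc c => if PySem.Chars.isdigit c then acc ++ [c] else acc ++ ['-']) []
  -- output = output.split('-')
  let parts := PySem.Chars.splitOn output ['-']
  -- length = []; for i, n in enumerate(output): length.append(len(n))
  let lengths := (PySem.List.enumerate parts).foldl
    (fun acc p => acc ++ [(p.2.length : Int)]) ([] : List Int)
  -- max_length = max(length)   (lengths is never empty: split returns ≥ 1 piece)
  let maxLength := match PySem.List.max? lengths (fun x => x) with
    | some m => m
    | none => 0  -- unreachable
  -- for i in output: if max_length == len(i): return "".join(i)
  -- ("".join(i) iterates the string i over its characters and rejoins them: exact)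
  match parts.find? (fun s => maxLength == (s.length : Int)) with
  | some s => String.ofList (PySem.Chars.join [] (s.map (fun c => [c])))
  | none => ""  -- unreachable: max_length is the length of some element

-- ===== PORT B =====
def digitPrefix_alt (input : String) : String :=
  let r := input.toList.foldl
    (fun (cb : List Char × List Char) c =>
      if PySem.Chars.isdigit c then (cb.1 ++ [c], cb.2)
      else ([], if cb.2.length < cb.1.length then cb.1 else cb.2))
    ([], [])
  String.ofList (if r.2.length < r.1.length then r.1 else r.2)

-- ===== PRECONDITION & SPEC =====
def Spec_digitPrefix (input : String) (out : String) : Prop := out = digitPrefix_alt input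
instance (input : String) (out : String) : Decidable (Spec_digitPrefix input out) := by unfold Spec_digitPrefix; infer_instance

-- ===== CLAIM (what is proved, stated in full; the proofs are below) =====
def Claim_equal_digitPrefix : Prop := ∀ (input : String), Dom_digitPrefix input → Spec_digitPrefix input (digitPrefix input)

-- ===== LEMMAS AND PROOFS =====

-- split of a char list on the single character '-', recursively
def mySplit : List Char → List (List Char)
  | [] => [[]]
  | c :: cs =>
    if c = '-' then [] :: mySplit cs
    else match mySplit cs with
      | s :: ss => (c :: s) :: ss
      | [] => [[c]]

-- digit segments of the input, as A's split produces them
def segs : List Char → List (List Char)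
  | [] => [[]]
  | c :: cs =>
    if PySem.Chars.isdigit c then
      match segs cs with
      | s :: ss => (c :: s) :: ss
      | [] => [[c]]
    else [] :: segs cs

-- running "first longest" pick
def pick (b s : List Char) : List Char := if b.length < s.length then s else b

-- maximum segment length, -1 for the empty list
def M : List (List Char) → Int
  | [] => -1
  | s :: t => max ((s.length : Int)) (M t)

lemma mySplit_ne_nil (l : List Char) : mySplit l ≠ [] := by
  cases l with
  | nil => simp [mySplit]
  | cons c cs =>
    simp only [mySplit]
    split
    · simp
    · cases h : mySplit cs <;> simp

lemma go_spec (l : List Char) : ∀ (fuel : Nat) (cur : List Char) (acc : List (List Char)),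
    l.length ≤ fuel →
    PySem.Chars.splitOn.go ['-'] fuel l cur acc =
      acc.reverse ++ (match mySplit l with
        | s :: ss => (cur.reverse ++ s) :: ss
        | [] => [cur.reverse]) := by
  induction l with
  | nil =>
    intro fuel cur acc _
    cases fuel <;> simp [PySem.Chars.splitOn.go, mySplit]
  | cons c cs ih =>
    intro fuel cur acc hf
    cases fuel with
    | zero => simp at hf
    | succ f =>
      have hf' : cs.length ≤ f := by simpa using hf
      by_cases hc : c = '-'
      · subst hc
        have hpre : List.isPrefixOf ['-'] ('-' :: cs) = true := by simp [List.isPrefixOf]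
        rw [PySem.Chars.splitOn.go, if_pos hpre]
        simp only [List.length_cons, List.length_nil, List.drop_succ_cons, List.drop_zero]
        rw [ih f [] (cur.reverse :: acc) hf']
        simp only [mySplit]
        cases h : mySplit cs with
        | nil => exact absurd h (mySplit_ne_nil cs)
        | cons s ss => simp
      · have hpre : List.isPrefixOf ['-'] (c :: cs) = false := by
          simp [List.isPrefixOf, Ne.symm hc]
        rw [PySem.Chars.splitOn.go, if_neg (by simp [hpre])]
        rw [ih f (c :: cur) acc hf']
        simp only [mySplit, if_neg hc]
        cases h : mySplit cs with
        | nil => exact absurd h (mySplit_ne_nil cs)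
        | cons s ss => simp

lemma splitOn_eq_mySplit (l : List Char) : PySem.Chars.splitOn l ['-'] = mySplit l := by
  unfold PySem.Chars.splitOn
  rw [go_spec l (l.length + 1) [] [] (by omega)]
  cases h : mySplit l with
  | nil => exact absurd h (mySplit_ne_nil l)
  | cons s ss => simp

lemma isdigit_ne_dash {c : Char} (h : PySem.Chars.isdigit c = true) : c ≠ '-' := by
  intro hc; subst hc; simp [PySem.Chars.isdigit] at h

-- A's masked string split on '-' is exactly the digit-segment list
lemma mySplit_mask (cs : List Char) :
    mySplit (cs.map (fun c => if PySem.Chars.isdigit c then c else '-')) = segs cs := by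
  induction cs with
  | nil => simp [mySplit, segs]
  | cons c cs ih =>
    by_cases hd : PySem.Chars.isdigit c
    · have hne := isdigit_ne_dash hd
      simp only [List.map_cons, if_pos hd, mySplit, segs, if_neg hne, ih]
    · simp [mySplit, segs, hd, ih]

lemma segs_ne_nil (cs : List Char) : segs cs ≠ [] := by
  cases cs with
  | nil => simp [segs]
  | cons c cs =>
    simp only [segs]
    split
    · cases h : segs cs <;> simp
    · simp

lemma mask_fold (cs : List Char) (acc : List Char) :
    cs.foldl (fun acc c => if PySem.Chars.isdigit c then acc ++ [c] else acc ++ ['-']) acc =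
      acc ++ cs.map (fun c => if PySem.Chars.isdigit c then c else '-') := by
  induction cs generalizing acc with
  | nil => simp
  | cons c cs ih =>
    simp only [List.foldl_cons, List.map_cons]
    by_cases hd : PySem.Chars.isdigit c
    · rw [if_pos hd, ih, if_pos hd]; simp
    · rw [if_neg hd, ih, if_neg hd]; simp

lemma lengths_fold (ps : List (List Char)) (k : Int) (acc : List Int) :
    (PySem.List.enumerate ps k).foldl (fun acc p => acc ++ [(p.2.length : Int)]) acc =
      acc ++ ps.map (fun s => ((s.length : Int))) := by
  induction ps generalizing k acc with
  | nil => simp [PySem.List.enumerate_nil]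
  | cons s ps ih =>
    simp only [PySem.List.enumerate_cons, List.foldl_cons]
    rw [ih]
    simp

lemma foldl_max_eq_M (t : List (List Char)) : ∀ (x : Int), -1 ≤ x →
    (t.map (fun s => ((s.length : Int)))).foldl max x = max x (M t) := by
  induction t with
  | nil => intro x hx; simp [M]; omega
  | cons s t ih =>
    intro x hx
    simp only [List.map_cons, List.foldl_cons, M]
    rw [ih (max x ((s.length : Int))) (by omega)]
    omega

lemma M_attained (t : List (List Char)) (h : t ≠ []) :
    (t.find? (fun s => M t == (s.length : Int))).isSome := by
  induction t with
  | nil => exact absurd rfl h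
  | cons s t ih =>
    by_cases he : M (s :: t) = (s.length : Int)
    · rw [List.find?_cons_of_pos (by simpa using he)]
      simp
    · have ht : t ≠ [] := by
        intro hn; subst hn
        simp only [M] at he
        omega
      have hMt : M (s :: t) = M t := by
        simp only [M] at he ⊢
        omega
      rw [List.find?_cons_of_neg (by simpa using he), hMt]
      exact ih ht

lemma foldl_pick_eq (t : List (List Char)) : ∀ (b : List Char),
    t.foldl pick b = if M t ≤ (b.length : Int) then b
      else (t.find? (fun s => M t == (s.length : Int))).getD b := by
  induction t with
  | nil => intro b; simp [M]
  | cons s t ih =>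
    intro b
    simp only [List.foldl_cons]
    by_cases hbs : b.length < s.length
    · rw [show pick b s = s from if_pos hbs, ih s]
      by_cases hts : M t ≤ (s.length : Int)
      · have hM : M (s :: t) = (s.length : Int) := by simp only [M]; omega
        rw [if_pos hts, if_neg (by simp only [M]; omega)]
        rw [List.find?_cons_of_pos (by simpa using hM)]
        simp
      · have hM : M (s :: t) = M t := by simp only [M]; omega
        rw [if_neg hts, if_neg (by simp only [M]; omega)]
        rw [List.find?_cons_of_neg (by simp only [beq_iff_eq, hM]; omega), hM]
        have hfind := M_attained t (by
          intro hn; subst hn; simp only [M] at hts; omega)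
        cases hof : t.find? (fun s => M t == (s.length : Int)) with
        | none => rw [hof] at hfind; simp at hfind
        | some r => simp
    · rw [show pick b s = b from if_neg hbs, ih b]
      by_cases htb : M t ≤ (b.length : Int)
      · rw [if_pos htb, if_pos (by simp only [M]; omega)]
      · have hM : M (s :: t) = M t := by simp only [M]; omega
        rw [if_neg htb, if_neg (by simp only [M]; omega)]
        rw [List.find?_cons_of_neg (by simp only [beq_iff_eq, hM]; omega), hM]

-- B's loop, run from any state, computes the running first-longest pick over the
-- segment list with the open run prefixed to the first segment
lemma B_loop (cs : List Char) : ∀ (cur best : List Char),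
    (let r := cs.foldl
        (fun (cb : List Char × List Char) c =>
          if PySem.Chars.isdigit c then (cb.1 ++ [c], cb.2)
          else ([], if cb.2.length < cb.1.length then cb.1 else cb.2)) (cur, best)
      if r.2.length < r.1.length then r.1 else r.2) =
    (match segs cs with
      | s :: ss => ((cur ++ s) :: ss).foldl pick best
      | [] => best) := by
  induction cs with
  | nil => intro cur best; simp [segs, pick]
  | cons c cs ih =>
    intro cur best
    by_cases hd : PySem.Chars.isdigit c
    · simp only [List.foldl_cons, if_pos hd]
      rw [ih (cur ++ [c]) best]
      simp only [segs, if_pos hd]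
      cases h : segs cs with
      | nil => exact absurd h (segs_ne_nil cs)
      | cons s ss => simp
    · simp only [List.foldl_cons, if_neg hd]
      rw [ih [] (if best.length < cur.length then cur else best)]
      simp only [segs, if_neg hd]
      cases h : segs cs with
      | nil => exact absurd h (segs_ne_nil cs)
      | cons s ss => simp [pick]

-- ===== VERDICT (by name: the statement is the Claim_ definition above) =====
theorem digitPrefix_spec : Claim_equal_digitPrefix := by
  intro input _
  unfold Spec_digitPrefix digitPrefix digitPrefix_alt
  simp only [mask_fold input.toList [], List.nil_append, splitOn_eq_mySplit,
    mySplit_mask, lengths_fold, List.nil_append]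
  rw [B_loop input.toList [] []]
  cases hsegs : segs input.toList with
  | nil => exact absurd hsegs (segs_ne_nil input.toList)
  | cons s ss =>
    simp only [List.nil_append, List.map_cons, PySem.List.max?_id_cons]
    have hmax : (ss.map (fun s => ((s.length : Int)))).foldl max ((s.length : Int)) =
        M (s :: ss) := by
      rw [foldl_max_eq_M ss ((s.length : Int)) (by omega)]
      simp [M]
    rw [hmax]
    have hfind := M_attained (s :: ss) (by simp)
    have hfold := foldl_pick_eq (s :: ss) []
    cases hof : (s :: ss).find? (fun u => M (s :: ss) == (u.length : Int)) with
    | none => rw [hof] at hfind; simp at hfind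
    | some r =>
      have hr : M (s :: ss) = (r.length : Int) := by
        have := List.find?_some hof
        simpa using this
      by_cases hM0 : M (s :: ss) ≤ 0
      · have hr0 : r = [] := by
          have : r.length = 0 := by omega
          exact List.eq_nil_of_length_eq_zero this
        rw [hfold, if_pos (by simpa using hM0)]
        simp [hr0, PySem.Chars.join, List.intercalate]
      · rw [hfold, if_neg (by simpa using hM0), hof]
        simp [PySem.Chars.join_nil_singletons r]
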